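-- pv_equiv track=rewrite | github.com/LiyuanLucasLiu/LM-LSTM-CRF | model/utils.py | generate_corpus
-- ===== SOURCE A (Python) =====
-- def shrink_features(feature_map, features, thresholds):
--     """
--     filter un-common features by threshold
--     """
--     feature_count = {k: 0 for (k, v) in iter(feature_map.items())}
--     for feature_list in features:
--         for feature in feature_list:
--             feature_count[feature] += 1
--     shrinked_feature_count = [k for (k, v) in iter(feature_count.items()) if v >= thresholds]
--     feature_map = {shrinked_feature_count[ind]: (ind + 1) for ind in range(0, len(shrinked_feature_count))}
--
--     #inserting unk to be 0 encoded
--     feature_map['<unk>'] = 0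
--     #inserting eof
--     feature_map['<eof>'] = len(feature_map)
--     return feature_map
--
-- def generate_corpus(lines, if_shrink_feature=False, thresholds=1):
--     """
--     generate label, feature, word dictionary and label dictionary
--
--     args:
--         lines : corpus
--         if_shrink_feature: whether shrink word-dictionary
--         threshold: threshold for shrinking word-dictionary
--
--     """
--     features = list()
--     labels = list()
--     tmp_fl = list()
--     tmp_ll = list()
--     feature_map = dict()
--     label_map = dict()
--     for line in lines:
--         if not (line.isspace() or (len(line) > 10 and line[0:10] == '-DOCSTART-')):
--             line = line.rstrip('\n').split()
--             tmp_fl.append(line[0])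
--             if line[0] not in feature_map:
--                 feature_map[line[0]] = len(feature_map) + 1 #0 is for unk
--             tmp_ll.append(line[-1])
--             if line[-1] not in label_map:
--                 label_map[line[-1]] = len(label_map)
--         elif len(tmp_fl) > 0:
--             features.append(tmp_fl)
--             labels.append(tmp_ll)
--             tmp_fl = list()
--             tmp_ll = list()
--     if len(tmp_fl) > 0:
--         features.append(tmp_fl)
--         labels.append(tmp_ll)
--     label_map['<start>'] = len(label_map)
--     label_map['<pad>'] = len(label_map)
--     if if_shrink_feature:
--         feature_map = shrink_features(feature_map, features, thresholds)
--     else: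
--         #inserting unk to be 0 encoded
--         feature_map['<unk>'] = 0
--         #inserting eof
--         feature_map['<eof>'] = len(feature_map)
--
--     return features, labels, feature_map, label_map
-- ===== SOURCE B (Python) =====
-- def generate_corpus(lines, if_shrink_feature=False, thresholds=1):
--     # pass 1: mark each line as a sentence boundary (None) or a (word, label) pair
--     marks = []
--     for line in lines:
--         if line.isspace() or (len(line) > 10 and line[0:10] == '-DOCSTART-'):
--             marks.append(None)
--         else:
--             toks = line.rstrip('\n').split()
--             marks.append((toks[0], toks[-1]))
--     # pass 2: group pairs into sentences, dropping empty groups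
--     sentences = []
--     cur = []
--     for m in marks:
--         if m is None:
--             if cur:
--                 sentences.append(cur)
--                 cur = []
--         else:
--             cur.append(m)
--     if cur:
--         sentences.append(cur)
--     features = [[w for w, _ in s] for s in sentences]
--     labels = [[t for _, t in s] for s in sentences]
--     # pass 3: build the maps from the grouped corpus
--     label_map = {}
--     for t in (t for s in labels for t in s):
--         if t not in label_map:
--             label_map[t] = len(label_map)
--     label_map['<start>'] = len(label_map)
--     label_map['<pad>'] = len(label_map)
--     if if_shrink_feature:
--         counts = {}
--         for w in (w for s in features for w in s):
--             counts[w] = counts.get(w, 0) + 1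
--         kept = [w for w, c in counts.items() if c >= thresholds]
--         feature_map = {w: i + 1 for i, w in enumerate(kept)}
--     else:
--         feature_map = {}
--         for w in (w for s in features for w in s):
--             if w not in feature_map:
--                 feature_map[w] = len(feature_map) + 1
--     feature_map['<unk>'] = 0
--     feature_map['<eof>'] = len(feature_map)
--     return features, labels, feature_map, label_map
-- ===== Notes on version B (the rewrite author's own statement) =====
-- stated objective: alternative
-- what changed: B replaces A's single six-variable accumulator loop by staged passes: tokenize lines into boundary/pair marks, group marks into sentences, then derive features/labels and build both first-occurrence maps (and, when shrinking, a fresh occurrence counter instead of A's zero-initialised map re-walked per sentence) from the grouped corpus.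
import Mathlib
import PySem

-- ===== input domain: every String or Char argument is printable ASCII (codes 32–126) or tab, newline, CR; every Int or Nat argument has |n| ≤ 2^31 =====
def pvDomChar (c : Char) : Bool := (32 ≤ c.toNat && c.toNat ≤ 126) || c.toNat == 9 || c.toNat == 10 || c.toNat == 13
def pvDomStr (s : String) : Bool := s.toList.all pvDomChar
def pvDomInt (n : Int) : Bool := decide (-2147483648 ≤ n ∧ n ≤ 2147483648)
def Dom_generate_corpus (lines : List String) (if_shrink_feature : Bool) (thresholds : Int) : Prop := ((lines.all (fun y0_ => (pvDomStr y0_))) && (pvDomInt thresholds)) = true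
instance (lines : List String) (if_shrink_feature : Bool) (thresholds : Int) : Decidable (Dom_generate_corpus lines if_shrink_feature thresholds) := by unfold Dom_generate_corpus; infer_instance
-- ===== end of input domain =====

-- B restructures A's single six-accumulator loop into staged passes (tokenize to boundary/pair
-- marks, group into sentences, then build the maps from the grouped corpus, with a fresh counter
-- when shrinking); same cost, proved to return the same value wherever Python A returns.

-- shared helpers: the line test, the `rstrip('\n').split()` tokenizer (both Pythons contain these
-- verbatim).  `line.rstrip('\n')` is ported by hand (exact: drops exactly the trailing '\n's);
-- toks[0] / toks[-1] via pyGetD — exact whenever toks ≠ [], i.e. on every input admitted by Pre_.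
def pvSkip (line : String) : Bool :=
  PySem.Str.strIsspace line ||
    (decide ((10 : Int) < PySem.Str.len line) && (PySem.Str.slice line (some 0) (some 10) == "-DOCSTART-"))

def pvRstripNl (line : String) : String :=
  String.ofList ((line.toList.reverse.dropWhile (fun c => c == '\n')).reverse)

def pvTok (line : String) : String × String :=
  let toks := PySem.Str.split₀ (pvRstripNl line)
  (PySem.List.pyGetD toks 0 "", PySem.List.pyGetD toks (-1) "")

-- the two `if … not in …` insertions (identical fragments in both Pythons)
def pvFeatStep (d : PySem.Dict String Int) (w : String) : PySem.Dict String Int :=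
  if d.contains w then d else d.insert w ((d.size : Int) + 1)

def pvLabStep (d : PySem.Dict String Int) (t : String) : PySem.Dict String Int :=
  if d.contains t then d else d.insert t (d.size : Int)

-- ===== PORT A =====
-- A's loop state: (features, labels, tmp_fl, tmp_ll, feature_map, label_map)
def pvStA : Type := List (List String) × List (List String) × List String × List String ×
  PySem.Dict String Int × PySem.Dict String Int

def pvStepA (s : pvStA) (line : String) : pvStA :=
  if !(pvSkip line) then
    let (w, l) := pvTok line
    (s.1, s.2.1, s.2.2.1 ++ [w], s.2.2.2.1 ++ [l], pvFeatStep s.2.2.2.2.1 w, pvLabStep s.2.2.2.2.2 l)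
  else if s.2.2.1.length > 0 then
    (s.1 ++ [s.2.2.1], s.2.1 ++ [s.2.2.2.1], [], [], s.2.2.2.2.1, s.2.2.2.2.2)
  else s

def shrink_features (feature_map : PySem.Dict String Int) (features : List (List String))
    (thresholds : Int) : PySem.Dict String Int :=
  -- feature_count = {k: 0 for (k, v) in feature_map.items()}
  let feature_count := feature_map.items.foldl (fun d p => d.insert p.1 (0 : Int)) PySem.Dict.empty
  -- feature_count[feature] += 1  (exact: every feature is a key of feature_map here)
  let feature_count := features.foldl
    (fun d feature_list => feature_list.foldl (fun d f => d.modify f 0 (· + 1)) d) feature_count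
  let shrinked := (feature_count.items.filter (fun p => thresholds ≤ p.2)).map Prod.fst
  let fm := (PySem.List.pyRange 0 (PySem.List.len shrinked) 1).foldl
    (fun d ind => d.insert (PySem.List.pyGetD shrinked ind "") (ind + 1)) PySem.Dict.empty
  let fm := fm.insert "<unk>" 0
  fm.insert "<eof>" (fm.size : Int)

def generate_corpus (lines : List String) (if_shrink_feature : Bool) (thresholds : Int) :
    List (List String) × List (List String) × (List (String × Int)) × (List (String × Int)) :=
  let st := lines.foldl pvStepA ([], [], [], [], PySem.Dict.empty, PySem.Dict.empty)
  let features := if st.2.2.1.length > 0 then st.1 ++ [st.2.2.1] else st.1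
  let labels := if st.2.2.1.length > 0 then st.2.1 ++ [st.2.2.2.1] else st.2.1
  let lm := st.2.2.2.2.2
  let lm := lm.insert "<start>" (lm.size : Int)
  let lm := lm.insert "<pad>" (lm.size : Int)
  let fm :=
    if if_shrink_feature then shrink_features st.2.2.2.2.1 features thresholds
    else
      let fm := st.2.2.2.2.1.insert "<unk>" 0
      fm.insert "<eof>" (fm.size : Int)
  (features, labels, fm.items, lm.items)

-- ===== PORT B =====
-- grouping step of pass 2 (cur is sc.2, sentences is sc.1)
def pvStepG (sc : List (List (String × String)) × List (String × String))
    (m : Option (String × String)) : List (List (String × String)) × List (String × String) :=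
  match m with
  | none => if sc.2.length > 0 then (sc.1 ++ [sc.2], []) else sc
  | some p => (sc.1, sc.2 ++ [p])

def generate_corpus_alt (lines : List String) (if_shrink_feature : Bool) (thresholds : Int) :
    List (List String) × List (List String) × (List (String × Int)) × (List (String × Int)) :=
  -- pass 1: marks
  let marks := lines.map (fun line => if pvSkip line then none else some (pvTok line))
  -- pass 2: group
  let g := marks.foldl pvStepG ([], [])
  let sentences := if g.2.length > 0 then g.1 ++ [g.2] else g.1
  let features := sentences.map (fun s => s.map Prod.fst)
  let labels := sentences.map (fun s => s.map Prod.snd)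
  -- pass 3: maps from the grouped corpus
  let lm := (labels.flatten).foldl pvLabStep PySem.Dict.empty
  let lm := lm.insert "<start>" (lm.size : Int)
  let lm := lm.insert "<pad>" (lm.size : Int)
  let fm :=
    if if_shrink_feature then
      let counts := (features.flatten).foldl (fun d w => d.insert w (d.getD w 0 + 1)) PySem.Dict.empty
      let kept := (counts.items.filter (fun p => thresholds ≤ p.2)).map Prod.fst
      (PySem.List.enumerate kept 0).foldl (fun d p => d.insert p.2 (p.1 + 1)) PySem.Dict.empty
    else (features.flatten).foldl pvFeatStep PySem.Dict.empty
  let fm := fm.insert "<unk>" 0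
  let fm := fm.insert "<eof>" (fm.size : Int)
  (features, labels, fm.items, lm.items)

-- ===== PRECONDITION & SPEC =====
-- Pre_ excludes lists containing the empty-string line, on which Python A raises IndexError
-- (toks[0] of an empty token list); every other line is skipped or yields at least one token.
def Pre_generate_corpus (lines : List String) (if_shrink_feature : Bool) (thresholds : Int) : Prop :=
  "" ∉ lines
instance (lines : List String) (if_shrink_feature : Bool) (thresholds : Int) : Decidable (Pre_generate_corpus lines if_shrink_feature thresholds) := by unfold Pre_generate_corpus; infer_instance

def pvWitness_generate_corpus : List String × Bool × Int := (["It O", " ", "is O"], false, 1)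

def Spec_generate_corpus (lines : List String) (if_shrink_feature : Bool) (thresholds : Int) (out : List (List String) × List (List String) × (List (String × Int)) × (List (String × Int))) : Prop := out = generate_corpus_alt lines if_shrink_feature thresholds
instance (lines : List String) (if_shrink_feature : Bool) (thresholds : Int) (out : List (List String) × List (List String) × (List (String × Int)) × (List (String × Int))) : Decidable (Spec_generate_corpus lines if_shrink_feature thresholds out) := by unfold Spec_generate_corpus; infer_instance

-- ===== CLAIM (what is proved, stated in full; the proofs are below) =====
def Claim_equal_generate_corpus : Prop := ∀ (lines : List String) (if_shrink_feature : Bool) (thresholds : Int), Dom_generate_corpus lines if_shrink_feature thresholds → Pre_generate_corpus lines if_shrink_feature thresholds → Spec_generate_corpus lines if_shrink_feature thresholds (generate_corpus lines if_shrink_feature thresholds)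

-- ===== LEMMAS AND PROOFS =====

theorem pv_contains_keys (d : PySem.Dict String Int) (w : String) :
    d.contains w = d.keys.contains w := by
  by_cases h : w ∈ d.keys
  · simp [PySem.Dict.contains_eq_decide_mem_keys, h]
  · simp only [PySem.Dict.contains_eq_decide_mem_keys, h, decide_false]
    cases hc : d.keys.contains w
    · rfl
    · exact absurd (List.contains_iff_mem.mp hc) h

theorem pv_featStep_keys (d : PySem.Dict String Int) (w : String) :
    (pvFeatStep d w).keys = PySem.Set.add d.keys w := by
  unfold pvFeatStep PySem.Set.add
  cases hc : d.contains w
  · rw [if_neg (by simp),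
      if_neg (by have h2 := hc; rw [PySem.Dict.contains_eq_decide_mem_keys] at h2; simpa using h2),
      PySem.Dict.keys_insert_of_not_contains d _ hc]
  · rw [if_pos (by simp),
      if_pos (by have h2 := hc; rw [PySem.Dict.contains_eq_decide_mem_keys] at h2; simpa using h2)]

theorem pv_keys_buildF (ws : List String) (d : PySem.Dict String Int) :
    (ws.foldl pvFeatStep d).keys = ws.foldl PySem.Set.add d.keys := by
  induction ws generalizing d with
  | nil => rfl
  | cons w ws ih => simp only [List.foldl_cons, ih, pv_featStep_keys]

-- keys of the first-occurrence map = ordered dedup of the token stream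
theorem pv_keys_buildF_empty (ws : List String) :
    (ws.foldl pvFeatStep PySem.Dict.empty).keys = PySem.Set.ofList ws := by
  rw [pv_keys_buildF]; rfl

-- the abstraction map: B's grouping state ↦ A's loop state
def pvPhi (sc : List (List (String × String)) × List (String × String)) : pvStA :=
  (sc.1.map (fun s => s.map Prod.fst), sc.1.map (fun s => s.map Prod.snd),
   sc.2.map Prod.fst, sc.2.map Prod.snd,
   ((sc.1.flatten ++ sc.2).map Prod.fst).foldl pvFeatStep PySem.Dict.empty,
   ((sc.1.flatten ++ sc.2).map Prod.snd).foldl pvLabStep PySem.Dict.empty)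

theorem pv_step_comm (sc : List (List (String × String)) × List (String × String)) (line : String) :
    pvStepA (pvPhi sc) line = pvPhi (pvStepG sc (if pvSkip line then none else some (pvTok line))) := by
  obtain ⟨S, c⟩ := sc
  rcases hp : pvTok line with ⟨w, l⟩
  cases h : pvSkip line
  · rw [if_neg (by simp [h])]
    unfold pvStepA pvStepG pvPhi
    simp [h, hp, List.foldl_append]
  · rw [if_pos rfl]
    unfold pvStepA pvStepG pvPhi
    by_cases hc : c.length > 0
    · simp [h, hc, List.flatten_append]
    · have hc0 : c = [] := List.length_eq_zero_iff.mp (by omega)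
      simp [h, hc0]

theorem pv_fold_comm (lines : List String) (sc : List (List (String × String)) × List (String × String)) :
    lines.foldl pvStepA (pvPhi sc) =
      pvPhi (lines.foldl (fun sc line => pvStepG sc (if pvSkip line then none else some (pvTok line))) sc) := by
  induction lines generalizing sc with
  | nil => rfl
  | cons line rest ih => simp only [List.foldl_cons, pv_step_comm, ih]

-- keys are preserved by the `+= 1` loop when every token is already a key
theorem pv_keys_modify_foldl (ws : List String) (d : PySem.Dict String Int)
    (h : ∀ w ∈ ws, d.contains w = true) :
    (ws.foldl (fun d f => d.modify f 0 (· + 1)) d).keys = d.keys := by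
  induction ws generalizing d with
  | nil => rfl
  | cons w ws ih =>
    have h1 : (d.modify w 0 (· + 1)).keys = d.keys := by
      rw [PySem.Dict.keys_modify, PySem.Dict.keys_insert_of_contains d _ (h w (by simp))]
    simp only [List.foldl_cons]
    rw [ih _ (fun w' hw' => by
      rw [pv_contains_keys, h1, ← pv_contains_keys]; exact h w' (by simp [hw']))]
    exact h1

-- A's zero-init-then-count dict equals B's fresh counter, as a dict
theorem pv_count_eq_counter (ws : List String) :
    (ws.foldl (fun d f => d.modify f 0 (· + 1))
      ((ws.foldl pvFeatStep PySem.Dict.empty).items.foldl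
        (fun d p => d.insert p.1 (0 : Int)) PySem.Dict.empty))
    = PySem.Dict.counter ws := by
  have hkeys : (ws.foldl pvFeatStep PySem.Dict.empty).keys = PySem.Set.ofList ws :=
    pv_keys_buildF_empty ws
  have hnd : (ws.foldl pvFeatStep PySem.Dict.empty).keys.Nodup := by
    rw [hkeys]; exact PySem.Set.nodup_ofList ws
  have hz : ((ws.foldl pvFeatStep PySem.Dict.empty).items.foldl
      (fun d p => d.insert p.1 (0 : Int)) PySem.Dict.empty).items
      = (ws.foldl pvFeatStep PySem.Dict.empty).items.map (fun p => (p.1, (0 : Int))) := by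
    simpa using PySem.Dict.items_foldl_insert_fresh
      (ws.foldl pvFeatStep PySem.Dict.empty).items Prod.fst (fun _ => (0 : Int)) PySem.Dict.empty
      (fun a _ => by simp) hnd
  have hzk : ((ws.foldl pvFeatStep PySem.Dict.empty).items.foldl
      (fun d p => d.insert p.1 (0 : Int)) PySem.Dict.empty).keys
      = (ws.foldl pvFeatStep PySem.Dict.empty).keys := by
    simp only [PySem.Dict.keys, hz, List.map_map]; rfl
  have hcontains : ∀ w ∈ ws, ((ws.foldl pvFeatStep PySem.Dict.empty).items.foldl
      (fun d p => d.insert p.1 (0 : Int)) PySem.Dict.empty).contains w = true := by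
    intro w hw
    rw [PySem.Dict.contains_eq_decide_mem_keys, hzk, hkeys]
    simpa using (PySem.Set.mem_ofList ws w).mpr hw
  have hkc : ((ws.foldl (fun d f => d.modify f 0 (· + 1))
      ((ws.foldl pvFeatStep PySem.Dict.empty).items.foldl
        (fun d p => d.insert p.1 (0 : Int)) PySem.Dict.empty))).keys = PySem.Set.ofList ws := by
    rw [pv_keys_modify_foldl ws _ hcontains, hzk, hkeys]
  apply PySem.Dict.ext
  rw [PySem.Dict.items_eq_map_keys _ (by rw [hkc]; exact PySem.Set.nodup_ofList ws) 0, hkc,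
    PySem.Dict.items_counter]
  apply List.map_congr_left
  intro k hk
  have hkmem : k ∈ (ws.foldl pvFeatStep PySem.Dict.empty).keys := by
    rw [hkeys]; exact hk
  obtain ⟨p, hp, hpk⟩ := List.mem_map.mp hkmem
  have hz0 : ((ws.foldl pvFeatStep PySem.Dict.empty).items.foldl
      (fun d p => d.insert p.1 (0 : Int)) PySem.Dict.empty).getD k 0 = 0 := by
    refine PySem.Dict.getD_of_mem_items _ ?_ (by rw [hzk]; exact hnd) 0
    rw [hz]
    exact List.mem_map.mpr ⟨p, hp, by simp [hpk]⟩
  rw [PySem.Dict.getD_foldl_modify_add_one, hz0, zero_add]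

-- A's shrink tail = B's shrink tail, given the same token stream
theorem pv_shrink_eq (S : List (List String)) (thresholds : Int) :
    shrink_features (S.flatten.foldl pvFeatStep PySem.Dict.empty) S thresholds =
      ((((PySem.List.enumerate (((S.flatten.foldl (fun d w => d.insert w (d.getD w 0 + 1)) PySem.Dict.empty).items.filter (fun p => thresholds ≤ p.2)).map Prod.fst) 0).foldl (fun d p => d.insert p.2 (p.1 + 1)) PySem.Dict.empty).insert "<unk>" 0).insert "<eof>" ((((PySem.List.enumerate (((S.flatten.foldl (fun d w => d.insert w (d.getD w 0 + 1)) PySem.Dict.empty).items.filter (fun p => thresholds ≤ p.2)).map Prod.fst) 0).foldl (fun d p => d.insert p.2 (p.1 + 1)) PySem.Dict.empty).insert "<unk>" 0).size : Int)) := by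
  unfold shrink_features
  dsimp only
  rw [← List.foldl_flatten, pv_count_eq_counter S.flatten,
    PySem.Dict.foldl_insert_getD_add_one_eq_counter,
    PySem.List.enumerate_eq_map_pyRange _ "", List.foldl_map]

-- ===== VERDICT (by name: the statement is the Claim_ definition above) =====
theorem generate_corpus_spec : Claim_equal_generate_corpus := by
  intro lines if_shrink_feature thresholds _ _
  unfold Spec_generate_corpus generate_corpus generate_corpus_alt
  dsimp only
  rw [List.foldl_map,
    show (([], [], [], [], PySem.Dict.empty, PySem.Dict.empty) : pvStA) = pvPhi ([], []) from rfl,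
    pv_fold_comm lines ([], [])]
  rcases hg : lines.foldl (fun sc line => pvStepG sc (if pvSkip line then none else some (pvTok line))) ([], []) with ⟨S, c⟩
  unfold pvPhi
  dsimp only
  have hflat : ∀ (Sfin : List (List (String × String))) (f : String × String → String),
      (Sfin.map (fun s => s.map f)).flatten = Sfin.flatten.map f := by
    intro Sfin f; rw [List.map_flatten]
  by_cases hc : c.length > 0
  · rw [if_pos (by simpa using hc), if_pos (by simpa using hc), if_pos hc]
    have hSf : List.map (fun s => List.map Prod.fst s) S ++ [List.map Prod.fst c]
        = (S ++ [c]).map (fun s => List.map Prod.fst s) := by simp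
    have hSl : List.map (fun s => List.map Prod.snd s) S ++ [List.map Prod.snd c]
        = (S ++ [c]).map (fun s => List.map Prod.snd s) := by simp
    have h1 : ((S ++ [c]).map (fun s => s.map Prod.fst)).flatten = (S.flatten ++ c).map Prod.fst := by
      rw [hflat]; simp [List.flatten_append]
    have h2 : ((S ++ [c]).map (fun s => s.map Prod.snd)).flatten = (S.flatten ++ c).map Prod.snd := by
      rw [hflat]; simp [List.flatten_append]
    rw [hSf, hSl, ← h1, ← h2]
    cases if_shrink_feature
    · rfl
    · rw [if_pos rfl, if_pos rfl, pv_shrink_eq ((S ++ [c]).map (fun s => s.map Prod.fst)) thresholds]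
  · have hc0 : c = [] := List.length_eq_zero_iff.mp (by omega)
    subst hc0
    simp only [List.map_nil, List.length_nil, gt_iff_lt, lt_self_iff_false, if_false]
    have h1 : (S.map (fun s => s.map Prod.fst)).flatten = (S.flatten ++ []).map Prod.fst := by
      rw [hflat]; simp
    have h2 : (S.map (fun s => s.map Prod.snd)).flatten = (S.flatten ++ []).map Prod.snd := by
      rw [hflat]; simp
    rw [← h1, ← h2]
    cases if_shrink_feature
    · rfl
    · rw [if_pos rfl, if_pos rfl, pv_shrink_eq (S.map (fun s => s.map Prod.fst)) thresholds]
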